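-- pv_equiv track=rewrite | github.com/queelius/computational-explorations | src/adversarial_misc.py | _cycle_bt
-- ===== SOURCE A (Python) =====
-- from typing import Dict, List, Optional, Set, Tuple, Any
--
-- def _cycle_bt(adj: Dict[int, Set[int]], path: list, target: int,
--               length: int, counter: list, max_iters: int) -> Optional[List[int]]:
--     """Backtracking search for chordless cycle with iteration budget."""
--     counter[0] += 1
--     if counter[0] >= max_iters:
--         return None
--
--     if len(path) == length:
--         if target in adj.get(path[-1], set()):
--             # Verify chordless
--             for i in range(len(path)):
--                 for j in range(i + 2, len(path)):
--                     if i == 0 and j == len(path) - 1: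
--                         continue
--                     if path[j] in adj.get(path[i], set()):
--                         return None
--             return list(path)
--         return None
--
--     current = path[-1]
--     for nxt in sorted(adj.get(current, set())):
--         if counter[0] >= max_iters:
--             return None
--         if nxt == target and len(path) < length:
--             continue
--         if nxt in path:
--             continue
--         if nxt < path[0]:
--             continue
--         path.append(nxt)
--         result = _cycle_bt(adj, path, target, length, counter, max_iters)
--         if result is not None:
--             return result
--         path.pop()
--     return None
-- ===== SOURCE B (Python) =====
-- from typing import Dict, List, Optional, Set, Tuple, Any
--
--
-- def _has_chord(adj, path):
--     """True iff the length-`len(path)` cycle candidate has a chord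
--     (the closing first-last edge is exempt)."""
--     n = len(path)
--     return any(w in adj.get(v, set())
--                for k, v in enumerate(path)
--                for w in path[k + 2: n - (1 if k == 0 else 0)])
--
--
-- def _viable(path, target, length, nxt):
--     """May nxt extend path?  (the three pruning rules of the search)"""
--     return (nxt != target or len(path) >= length) \
--         and nxt not in path and nxt >= path[0]
--
--
-- def _cycle_bt(adj: Dict[int, Set[int]], path: list, target: int,
--               length: int, counter: list, max_iters: int) -> Optional[List[int]]:
--     """One flat state-machine loop instead of recursion.  State: the current
--     path, the untried neighbors at the current depth (None = node just
--     entered), and a stack of untried-neighbor lists of the enclosing depths.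
--     Return value only: the caller's path list is not mutated."""
--     path = list(path)
--     pending = None
--     stack = []
--     while True:
--         if pending is None:                       # entering a node
--             counter[0] += 1
--             if counter[0] >= max_iters:
--                 return None
--             if len(path) == length:               # leaf: test, else fail upward
--                 if target in adj.get(path[-1], set()) and not _has_chord(adj, path):
--                     return list(path)
--                 pending = []
--             else:
--                 pending = sorted(adj.get(path[-1], set()))
--         elif pending:                             # try the next untried neighbor
--             nxt, pending = pending[0], pending[1:]
--             if counter[0] >= max_iters:
--                 return None
--             if _viable(path, target, length, nxt):
--                 stack.append(pending)
--                 path.append(nxt)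
--                 pending = None
--         else:                                     # depth exhausted: backtrack
--             if not stack:
--                 return None
--             pending = stack.pop()
--             path.pop()
-- ===== Notes on version B (the rewrite author's own statement) =====
-- stated objective: alternative
-- what changed: The recursive backtracking is replaced by a single flat state-machine loop whose state is (current path, untried neighbors at the current depth or None right after entering a node, stack of untried-neighbor lists of enclosing depths); the chord test becomes one slice-based comprehension over enumerate(path) and the three pruning rules one boolean predicate, with success and budget exhaustion returned directly from the loop instead of bubbling through nested calls.
import Mathlib
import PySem

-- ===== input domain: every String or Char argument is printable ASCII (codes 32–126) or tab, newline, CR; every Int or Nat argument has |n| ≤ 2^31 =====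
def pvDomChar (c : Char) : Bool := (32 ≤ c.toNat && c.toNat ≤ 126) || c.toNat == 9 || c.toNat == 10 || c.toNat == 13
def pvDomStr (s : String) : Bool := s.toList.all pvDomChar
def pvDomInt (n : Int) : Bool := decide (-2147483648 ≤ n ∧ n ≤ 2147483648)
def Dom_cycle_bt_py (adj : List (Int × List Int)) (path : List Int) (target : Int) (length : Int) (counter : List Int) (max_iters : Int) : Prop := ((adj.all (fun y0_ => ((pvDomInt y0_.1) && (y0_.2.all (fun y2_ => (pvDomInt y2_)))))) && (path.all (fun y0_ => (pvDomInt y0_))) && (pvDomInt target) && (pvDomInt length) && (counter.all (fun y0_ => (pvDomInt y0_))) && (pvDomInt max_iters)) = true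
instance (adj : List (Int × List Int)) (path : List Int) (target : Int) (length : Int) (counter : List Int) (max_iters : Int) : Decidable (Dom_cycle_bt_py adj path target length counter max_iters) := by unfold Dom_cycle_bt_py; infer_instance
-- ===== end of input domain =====

-- B replaces A's recursion by one flat state-machine loop over (path, untried neighbors, stack of
-- untried-neighbor lists); equivalence is about the RETURN value only: A mutates `path` in place, B copies it.

-- ===== PORT A =====
-- adj.get(k, set())
def adjGetA (adj : List (Int × List Int)) (k : Int) : List Int := PySem.Dict.getD (PySem.Dict.mk adj) k []

-- the nested `for i … for j in range(i+2, …)` chord scan with early `return None` (True = a chord was found)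
def hasChordA (adj : List (Int × List Int)) (path : List Int) : Bool :=
  (PySem.List.pyRange 0 (path.length : Int) 1).any fun i =>
    (PySem.List.pyRange (i + 2) (path.length : Int) 1).any fun j =>
      !(i == 0 && j == (path.length : Int) - 1) &&
        (adjGetA adj (PySem.List.pyGetD path i 0)).contains (PySem.List.pyGetD path j 0)

-- the `len(path) == length` leaf block of A
def leafA (adj : List (Int × List Int)) (path : List Int) (target : Int) : Option (List Int) :=
  if (adjGetA adj (PySem.List.pyGetD path (-1) 0)).contains target then
    if hasChordA adj path then none else some path
  else none

-- the recursion, with the counter threaded as a value and fuel = (max_iters - counter).toNat;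
-- the fuel-0 branch coincides with the entry budget check, which always fires there.
mutual
def btA (fuel : Nat) (adj : List (Int × List Int)) (path : List Int) (target length : Int)
    (c M : Int) : Option (List Int) × Int :=
  if M ≤ c + 1 then (none, c + 1)
  else
    match fuel with
    | 0 => (none, c + 1)
    | Nat.succ f =>
      if (path.length : Int) = length then (leafA adj path target, c + 1)
      else
        loopA f adj path target length M
          (PySem.List.sorted (adjGetA adj (PySem.List.pyGetD path (-1) 0)) (fun x => x)) (c + 1)
termination_by (fuel, 0)

-- `for nxt in sorted(...)` with its budget re-check, skip conditions, append/recurse/pop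
def loopA (fuel : Nat) (adj : List (Int × List Int)) (path : List Int) (target length M : Int)
    (nbrs : List Int) (c : Int) : Option (List Int) × Int :=
  match nbrs with
  | [] => (none, c)
  | nxt :: rest =>
    if M ≤ c then (none, c)
    else if nxt = target ∧ (path.length : Int) < length then loopA fuel adj path target length M rest c
    else if nxt ∈ path then loopA fuel adj path target length M rest c
    else if nxt < PySem.List.pyGetD path 0 0 then loopA fuel adj path target length M rest c
    else
      match btA fuel adj (path ++ [nxt]) target length c M with
      | (some r, c') => (some r, c')
      | (none, c') => loopA fuel adj path target length M rest c'
termination_by (fuel, nbrs.length + 1)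
end

def cycle_bt_py (adj : List (Int × List Int)) (path : List Int) (target : Int) (length : Int)
    (counter : List Int) (max_iters : Int) : Option (List Int) :=
  match counter with
  | [] => none  -- Python raises IndexError on counter[0]; excluded by Pre_
  | c0 :: _ => (btA (max_iters - c0).toNat adj path target length c0 max_iters).1

-- ===== PORT B =====
-- Source B's `adj.get(v, set())`
def nbrsOf (adj : List (Int × List Int)) (v : Int) : List Int := PySem.Dict.getD (PySem.Dict.mk adj) v []

-- Source B's _has_chord: one comprehension over enumerate(path) and a slice of candidates per vertex
def hasChordB (adj : List (Int × List Int)) (path : List Int) : Bool :=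
  (PySem.List.enumerate path 0).any fun kv =>
    (PySem.List.slice path (some (kv.1 + 2))
        (some ((path.length : Int) - (if kv.1 = 0 then 1 else 0)))).any fun w =>
      (nbrsOf adj kv.2).contains w

-- Source B's _viable: the three pruning rules as one boolean formula
def viableB (path : List Int) (target length nxt : Int) : Bool :=
  (nxt != target || length ≤ (path.length : Int)) && !path.contains nxt && path.headD 0 ≤ nxt

-- termination measure of Source B's flat loop (cited by `termination_by` only)
def measB (pending : Option (List Int)) (stack : List (List Int)) : Nat :=
  3 * ((pending.getD []).length + (stack.map List.length).sum) + stack.length +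
    (if pending = none then 1 else 0)

-- Source B's `while True` state machine: pending = untried neighbors at the current depth
-- (none = the node was just entered), stack = untried-neighbor lists of the enclosing depths
def stepB (adj : List (Int × List Int)) (target length M : Int) :
    Nat → List Int → Option (List Int) → List (List Int) → Int → Option (List Int)
  | 0, _, none, _, _ => none  -- entry with exhausted fuel: the budget check below would fire anyway
  | Nat.succ f, path, none, stack, c =>
    if M ≤ c + 1 then none
    else if (path.length : Int) = length then
      if (nbrsOf adj (path.getLast?.getD 0)).contains target && !hasChordB adj path then some path
      else stepB adj target length M f path (some []) stack (c + 1)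
    else
      stepB adj target length M f path
        (some (PySem.List.sorted (nbrsOf adj (path.getLast?.getD 0)) (fun x => x))) stack (c + 1)
  | fuel, path, some [], stack, c =>
    match stack with
    | [] => none
    | rem :: rest => stepB adj target length M fuel path.dropLast (some rem) rest c
  | fuel, path, some (nxt :: rem), stack, c =>
    if M ≤ c then none
    else if viableB path target length nxt then
      stepB adj target length M fuel (path ++ [nxt]) none (rem :: stack) c
    else stepB adj target length M fuel path (some rem) stack c
termination_by fuel _ pending stack _ => (fuel, measB pending stack)
decreasing_by all_goals simp [measB] <;> omega

def cycle_bt_py_alt (adj : List (Int × List Int)) (path : List Int) (target : Int) (length : Int)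
    (counter : List Int) (max_iters : Int) : Option (List Int) :=
  match counter with
  | [] => none  -- Python raises IndexError on counter[0]; excluded by Pre_
  | c0 :: _ => stepB adj target length max_iters (max_iters - c0).toNat path none [] c0

-- ===== PRECONDITION & SPEC =====
-- Pre_ excludes exactly the inputs where Python A raises IndexError: an empty counter list, and an
-- empty path that survives the entry budget check (path[-1] is then read).
def Pre_cycle_bt_py (adj : List (Int × List Int)) (path : List Int) (target : Int) (length : Int) (counter : List Int) (max_iters : Int) : Prop :=
  counter ≠ [] ∧ (path ≠ [] ∨ max_iters ≤ counter.headD 0 + 1)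
instance (adj : List (Int × List Int)) (path : List Int) (target : Int) (length : Int) (counter : List Int) (max_iters : Int) : Decidable (Pre_cycle_bt_py adj path target length counter max_iters) := by unfold Pre_cycle_bt_py; infer_instance

def pvWitness_cycle_bt_py : (List (Int × List Int)) × List Int × Int × Int × List Int × Int :=
  ([(0, [1, 2]), (1, [0, 2]), (2, [0, 1])], [0], 0, 3, [0], 100)

def Spec_cycle_bt_py (adj : List (Int × List Int)) (path : List Int) (target : Int) (length : Int) (counter : List Int) (max_iters : Int) (out : Option (List Int)) : Prop := out = cycle_bt_py_alt adj path target length counter max_iters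
instance (adj : List (Int × List Int)) (path : List Int) (target : Int) (length : Int) (counter : List Int) (max_iters : Int) (out : Option (List Int)) : Decidable (Spec_cycle_bt_py adj path target length counter max_iters out) := by unfold Spec_cycle_bt_py; infer_instance

-- ===== CLAIM (what is proved, stated in full; the proofs are below) =====
def Claim_equal_cycle_bt_py : Prop := ∀ (adj : List (Int × List Int)) (path : List Int) (target : Int) (length : Int) (counter : List Int) (max_iters : Int), Dom_cycle_bt_py adj path target length counter max_iters → Pre_cycle_bt_py adj path target length counter max_iters → Spec_cycle_bt_py adj path target length counter max_iters (cycle_bt_py adj path target length counter max_iters)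

-- ===== LEMMAS AND PROOFS =====

-- A's and B's dict lookups are the same function
theorem nbrsOf_eq (adj : List (Int × List Int)) (v : Int) : nbrsOf adj v = adjGetA adj v := rfl

-- bridge: path[-1] read the two ways
theorem last_bridge (path : List Int) :
    PySem.List.pyGetD path (-1) 0 = path.getLast?.getD 0 := by
  cases path with
  | nil => rfl
  | cons x xs =>
    rw [PySem.List.pyGetD_neg_one (x :: xs) 0 (List.cons_ne_nil x xs)]
    simp [List.getLast?_eq_some_getLast]

-- bridge: path[0] read the two ways
theorem head_bridge (path : List Int) :
    PySem.List.pyGetD path 0 0 = path.headD 0 := by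
  cases path <;> simp [PySem.List.pyGetD_zero]

-- Source B's _viable is the conjunction of the negations of A's three skip tests
theorem viableB_iff (path : List Int) (target length nxt : Int) :
    viableB path target length nxt = true ↔
      ¬(nxt = target ∧ (path.length : Int) < length) ∧ nxt ∉ path ∧
        ¬(nxt < PySem.List.pyGetD path 0 0) := by
  simp [viableB, head_bridge, not_and, not_lt, imp_iff_not_or, and_assoc]

-- an index-range `any` is an `any` over the corresponding slice (b within bounds)
theorem any_pyRange_eq_any_slice (xs : List Int) (p : Int → Bool) (a b : Int)
    (ha : 0 ≤ a) (hb0 : 0 ≤ b) (hb : b ≤ (xs.length : Int)) :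
    (PySem.List.pyRange a b 1).any (fun j => p (PySem.List.pyGetD xs j 0)) =
      (PySem.List.slice xs (some a) (some b)).any p := by
  rw [PySem.List.slice_toNat xs ha hb0, Bool.eq_iff_iff]
  simp only [List.any_eq_true]
  constructor
  · rintro ⟨j, hj, hpj⟩
    rw [PySem.List.mem_pyRange_one] at hj
    rw [PySem.List.pyGetD_eq_getElem xs 0 (by omega) (by omega)] at hpj
    refine ⟨xs[j.toNat], ?_, hpj⟩
    rw [List.mem_take_iff_getElem]
    refine ⟨j.toNat - a.toNat, by simp; omega, ?_⟩
    rw [List.getElem_drop]; congr 1; omega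
  · rintro ⟨x, hx, hpx⟩
    rw [List.mem_take_iff_getElem] at hx
    obtain ⟨k, hk, hxk⟩ := hx
    rw [List.getElem_drop] at hxk
    simp only [lt_min_iff, List.length_drop] at hk
    refine ⟨a + k, ?_, ?_⟩
    · rw [PySem.List.mem_pyRange_one]; omega
    · rw [PySem.List.pyGetD_eq_getElem xs 0 (by omega) (by omega)]
      simp only [show (a + (k : Int)).toNat = a.toNat + k from by omega]
      rw [hxk]; exact hpx

-- a pointwise-equal predicate gives the same `any` (membership-restricted congruence)
theorem anyCongrMem {α : Type} (l : List α) (p q : α → Bool) (h : ∀ x ∈ l, p x = q x) :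
    l.any p = l.any q := by
  rw [Bool.eq_iff_iff]
  simp only [List.any_eq_true]
  exact ⟨fun ⟨x, hx, hp⟩ => ⟨x, hx, (h x hx) ▸ hp⟩, fun ⟨x, hx, hp⟩ => ⟨x, hx, (h x hx).symm ▸ hp⟩⟩

-- drop the final index b-1 from a range-`any` whose predicate excludes it
theorem any_pyRange_exclude_top (a b : Int) (q : Int → Bool) :
    (PySem.List.pyRange a b 1).any (fun j => !(j == b - 1) && q j) =
      (PySem.List.pyRange a (b - 1) 1).any q := by
  by_cases hab : b ≤ a
  · rw [PySem.List.pyRange_one_eq_nil hab, PySem.List.pyRange_one_eq_nil (show b - 1 ≤ a by omega)]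
    rfl
  · obtain ⟨c, rfl⟩ : ∃ c, b = c + 1 := ⟨b - 1, by omega⟩
    rw [show c + 1 - 1 = c from add_sub_cancel_right c 1,
        PySem.List.pyRange_one_succ_right (show a ≤ c by omega)]
    simp only [List.any_append, List.any_cons, List.any_nil, beq_self_eq_true, Bool.not_true,
      Bool.false_and, Bool.or_false]
    refine anyCongrMem _ _ _ ?_
    intro j hj
    rw [PySem.List.mem_pyRange_one] at hj
    simp only [show (j == c) = false by simp; omega, Bool.not_false, Bool.true_and]

-- the two chord scans agree
theorem hasChord_eq (adj : List (Int × List Int)) (path : List Int) :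
    hasChordB adj path = hasChordA adj path := by
  unfold hasChordB hasChordA
  rw [PySem.List.enumerate_eq_map_pyRange path 0, List.any_map]
  simp only [PySem.List.len_eq]
  refine anyCongrMem _ _ _ ?_
  intro i hi
  rw [PySem.List.mem_pyRange_one] at hi
  simp only [Function.comp, nbrsOf_eq]
  by_cases h0 : i = 0
  · subst h0
    simp only [beq_self_eq_true, Bool.true_and, zero_add]
    rw [any_pyRange_exclude_top 2 (path.length : Int)
        (fun j => (adjGetA adj (PySem.List.pyGetD path 0 0)).contains (PySem.List.pyGetD path j 0)),
      any_pyRange_eq_any_slice path _ 2 ((path.length : Int) - 1) (by omega) (by omega) (by omega)]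
    exact anyCongrMem _ _ _ (fun w _ => by simp)
  · simp only [show (i == 0) = false from by simp [h0], if_neg h0, sub_zero, Bool.false_and,
      Bool.not_false, Bool.true_and]
    rw [any_pyRange_eq_any_slice path _ (i + 2) (path.length : Int) (by omega) (by omega)
      (by omega)]

-- budget already exhausted: the loop returns (none, c) untouched
theorem loopA_budget (fuel : Nat) (adj : List (Int × List Int)) (path : List Int)
    (target length M : Int) (nbrs : List Int) (c : Int) (h : M ≤ c) :
    loopA fuel adj path target length M nbrs c = (none, c) := by
  cases nbrs with
  | nil => simp [loopA]
  | cons nxt rest => simp [loopA, h]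

-- budget already exhausted: a call returns (none, c+1)
theorem btA_budget (fuel : Nat) (adj : List (Int × List Int)) (path : List Int)
    (target length : Int) (c M : Int) (h : M ≤ c) :
    btA fuel adj path target length c M = (none, c + 1) := by
  cases fuel with
  | zero => simp [btA]
  | succ f => simp [btA, show M ≤ c + 1 by omega]

-- the counter value is monotone through a call / through the loop
theorem mono_btA_loopA (fuel : Nat) :
    (∀ adj path target length c M, c ≤ (btA fuel adj path target length c M).2) ∧
    (∀ adj path target length M nbrs c, c ≤ (loopA fuel adj path target length M nbrs c).2) := by
  induction fuel with
  | zero =>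
    have hbt : ∀ (adj : List (Int × List Int)) path target length (c M : Int),
        c ≤ (btA 0 adj path target length c M).2 := by
      intro adj path target length c M
      by_cases h : M ≤ c + 1 <;> simp [btA, h] <;> omega
    refine ⟨hbt, ?_⟩
    intro adj path target length M nbrs
    induction nbrs with
    | nil => intro c; simp [loopA]
    | cons nxt rest ih =>
      intro c
      simp only [loopA]
      split_ifs with h1 h2 h3 h4
      · simp
      · exact ih c
      · exact ih c
      · exact ih c
      · have h5 := hbt adj (path ++ [nxt]) target length c M
        rcases hres : btA 0 adj (path ++ [nxt]) target length c M with ⟨r, c'⟩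
        rw [hres] at h5
        cases r with
        | some v => simpa using h5
        | none =>
          simp only
          exact le_trans h5 (ih c')
  | succ f ih =>
    have hbt : ∀ (adj : List (Int × List Int)) path target length (c M : Int),
        c ≤ (btA (f + 1) adj path target length c M).2 := by
      intro adj path target length c M
      simp only [btA]
      split_ifs with h1 h2
      · simp
      · simp
      · have := ih.2 adj path target length M
          (PySem.List.sorted (adjGetA adj (PySem.List.pyGetD path (-1) 0)) (fun x => x)) (c + 1)
        omega
    refine ⟨hbt, ?_⟩
    intro adj path target length M nbrs
    induction nbrs with
    | nil => intro c; simp [loopA]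
    | cons nxt rest ihl =>
      intro c
      simp only [loopA]
      split_ifs with h1 h2 h3 h4
      · simp
      · exact ihl c
      · exact ihl c
      · exact ihl c
      · have h5 := hbt adj (path ++ [nxt]) target length c M
        rcases hres : btA (f + 1) adj (path ++ [nxt]) target length c M with ⟨r, c'⟩
        rw [hres] at h5
        cases r with
        | some v => simpa using h5
        | none =>
          simp only
          exact le_trans h5 (ihl c')

-- any sufficient fuel computes the same call / loop result
theorem fuel_irrel (k : Nat) :
    (∀ (adj : List (Int × List Int)) path target length (M c : Int) (f f' : Nat),
      (M - c).toNat ≤ k → (M - c).toNat ≤ f → (M - c).toNat ≤ f' →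
      btA f adj path target length c M = btA f' adj path target length c M) ∧
    (∀ (adj : List (Int × List Int)) path target length (M : Int) nbrs (c : Int) (f f' : Nat),
      (M - c).toNat ≤ k → (M - c).toNat ≤ f → (M - c).toNat ≤ f' →
      loopA f adj path target length M nbrs c = loopA f' adj path target length M nbrs c) := by
  induction k using Nat.strong_induction_on with
  | _ k ihk =>
    have hbt : ∀ (adj : List (Int × List Int)) path target length (M c : Int) (f f' : Nat),
        (M - c).toNat ≤ k → (M - c).toNat ≤ f → (M - c).toNat ≤ f' →
        btA f adj path target length c M = btA f' adj path target length c M := by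
      intro adj path target length M c f f' hk hf hf'
      by_cases hc : M ≤ c
      · rw [btA_budget f _ _ _ _ _ _ hc, btA_budget f' _ _ _ _ _ _ hc]
      · have hkpos : 1 ≤ (M - c).toNat := by omega
        obtain ⟨fa, rfl⟩ : ∃ fa, f = fa + 1 := ⟨f - 1, by omega⟩
        obtain ⟨fb, rfl⟩ : ∃ fb, f' = fb + 1 := ⟨f' - 1, by omega⟩
        simp only [btA]
        split_ifs with h1 h2
        · rfl
        · rfl
        · exact (ihk (k - 1) (by omega)).2 adj path target length M _ (c + 1) fa fb
            (by omega) (by omega) (by omega)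
    refine ⟨hbt, ?_⟩
    intro adj path target length M nbrs
    induction nbrs with
    | nil => intro c f f' _ _ _; simp [loopA]
    | cons nxt rest ihl =>
      intro c f f' hk hf hf'
      simp only [loopA]
      split_ifs with h1 h2 h3 h4
      · rfl
      · exact ihl c f f' hk hf hf'
      · exact ihl c f f' hk hf hf'
      · exact ihl c f f' hk hf hf'
      · rw [hbt adj (path ++ [nxt]) target length M c f f' hk hf hf']
        rcases hres : btA f' adj (path ++ [nxt]) target length c M with ⟨r, c'⟩
        have hmono := (mono_btA_loopA f').1 adj (path ++ [nxt]) target length c M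
        rw [hres] at hmono
        cases r with
        | some v => rfl
        | none =>
          simp only
          exact ihl c' f f' (by omega) (by omega) (by omega)

-- A's leaf block, written through B's helpers (bridged by the lemmas above)
theorem leafA_of_true (adj : List (Int × List Int)) (path : List Int) (target : Int)
    (h : ((nbrsOf adj (path.getLast?.getD 0)).contains target && !hasChordB adj path) = true) :
    leafA adj path target = some path := by
  rw [Bool.and_eq_true, Bool.not_eq_eq_eq_not, Bool.not_true] at h
  unfold leafA
  rw [last_bridge, ← nbrsOf_eq, h.1, ← hasChord_eq, h.2]
  rfl

theorem leafA_of_false (adj : List (Int × List Int)) (path : List Int) (target : Int)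
    (h : ¬ ((nbrsOf adj (path.getLast?.getD 0)).contains target && !hasChordB adj path) = true) :
    leafA adj path target = none := by
  unfold leafA
  rw [last_bridge, ← nbrsOf_eq]
  rcases hct : (nbrsOf adj (path.getLast?.getD 0)).contains target with _ | _
  · rfl
  · rcases hch : hasChordA adj path with _ | _
    · exfalso; apply h; rw [hct, hasChord_eq, hch]; rfl
    · simp

-- a call with budget M ≤ c + 1 returns (none, c + 1) for any fuel
theorem btA_budget1 (fuel : Nat) (adj : List (Int × List Int)) (path : List Int)
    (target length : Int) (c M : Int) (h : M ≤ c + 1) :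
    btA fuel adj path target length c M = (none, c + 1) := by
  cases fuel <;> simp [btA, h]

-- the loop on an empty neighbor list
theorem loopA_nil (fuel : Nat) (adj : List (Int × List Int)) (path : List Int)
    (target length M c : Int) : loopA fuel adj path target length M [] c = (none, c) := by
  simp [loopA]

-- a skipped neighbor leaves the loop state untouched
theorem loopA_skip (fuel : Nat) (adj : List (Int × List Int)) (path : List Int)
    (target length M : Int) (nxt : Int) (rest : List Int) (c : Int) (hc : ¬ M ≤ c)
    (hs : (nxt = target ∧ (path.length : Int) < length) ∨ nxt ∈ path ∨
          nxt < PySem.List.pyGetD path 0 0) :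
    loopA fuel adj path target length M (nxt :: rest) c =
      loopA fuel adj path target length M rest c := by
  rw [loopA.eq_def]
  simp only [if_neg hc]
  split_ifs with a b d <;> first | rfl | (exfalso; tauto)

-- A's result after unwinding a stack of pending neighbor lists (denotation of B's stack)
def unwindA (f : Nat) (adj : List (Int × List Int)) (target length M : Int) :
    List (List Int) → List Int → Int → Option (List Int)
  | [], _, _ => none
  | rem :: rest, path, c =>
    match loopA f adj path target length M rem c with
    | (some r, _) => some r
    | (none, c') => unwindA f adj target length M rest path.dropLast c'

theorem unwindA_budget (f : Nat) (adj : List (Int × List Int)) (target length M : Int)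
    (stack : List (List Int)) (path : List Int) (c : Int) (h : M ≤ c) :
    unwindA f adj target length M stack path c = none := by
  induction stack generalizing path with
  | nil => rfl
  | cons rem rest ih =>
    simp only [unwindA, loopA_budget _ _ _ _ _ _ _ _ h]
    exact ih path.dropLast

-- the denotation of a B-machine state as an A-side computation
def denoA (fA : Nat) (adj : List (Int × List Int)) (target length M : Int) :
    Option (List Int) → List (List Int) → List Int → Int → Option (List Int)
  | some rem, stack, path, c => unwindA fA adj target length M (rem :: stack) path c
  | none, stack, path, c =>
    match btA fA adj path target length c M with
    | (some r, _) => some r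
    | (none, c') => unwindA fA adj target length M stack path.dropLast c'

-- MAIN SIMULATION: B's state machine computes A's unwound result
theorem simB (adj : List (Int × List Int)) (target length M : Int) :
    ∀ (fuel : Nat) (path : List Int) (pending : Option (List Int)) (stack : List (List Int))
      (c : Int), ∀ fA : Nat, (M - c).toNat ≤ fuel → (M - c).toNat ≤ fA →
    stepB adj target length M fuel path pending stack c =
      denoA fA adj target length M pending stack path c := by
  intro fuel path pending stack c
  induction fuel, path, pending, stack, c using stepB.induct adj target length M with
  | case1 path stack c =>
    intro fA hfuel hfA
    have hc : M ≤ c := by omega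
    rw [stepB, denoA, btA_budget fA _ _ _ _ _ _ hc,
      show (match ((none : Option (List Int)), c + 1) with
        | (some r, _) => some r
        | (none, c') => unwindA fA adj target length M stack path.dropLast c') =
        unwindA fA adj target length M stack path.dropLast (c + 1) from rfl,
      unwindA_budget fA adj target length M stack path.dropLast (c + 1) (by omega)]
  | case2 f path stack c hb =>
    intro fA hfuel hfA
    rw [stepB, if_pos hb, denoA, btA_budget1 fA _ _ _ _ _ _ hb,
      show (match ((none : Option (List Int)), c + 1) with
        | (some r, _) => some r
        | (none, c') => unwindA fA adj target length M stack path.dropLast c') =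
        unwindA fA adj target length M stack path.dropLast (c + 1) from rfl,
      unwindA_budget fA adj target length M stack path.dropLast (c + 1) hb]
  | case3 f path stack c hb hlen hok =>
    intro fA hfuel hfA
    obtain ⟨fa, rfl⟩ : ∃ fa, fA = fa + 1 := ⟨fA - 1, by omega⟩
    rw [stepB, if_neg hb, if_pos hlen, if_pos hok, denoA]
    simp only [btA, if_neg hb, if_pos hlen, leafA_of_true adj path target hok]
  | case4 f path stack c hb hlen hok ih =>
    intro fA hfuel hfA
    obtain ⟨fa, rfl⟩ : ∃ fa, fA = fa + 1 := ⟨fA - 1, by omega⟩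
    rw [stepB, if_neg hb, if_pos hlen, if_neg hok]
    rw [ih (fa + 1) (by omega) (by omega), denoA, denoA]
    simp only [btA, if_neg hb, if_pos hlen, leafA_of_false adj path target hok, unwindA, loopA]
  | case5 f path stack c hb hlen ih =>
    intro fA hfuel hfA
    obtain ⟨fa, rfl⟩ : ∃ fa, fA = fa + 1 := ⟨fA - 1, by omega⟩
    rw [stepB, if_neg hb, if_neg hlen]
    rw [ih (fa + 1) (by omega) (by omega), denoA, denoA, unwindA]
    simp only [btA, if_neg hb, if_neg hlen]
    rw [nbrsOf_eq, ← last_bridge,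
      (fuel_irrel ((M - (c + 1)).toNat)).2 adj path target length M _ (c + 1) (fa + 1) fa
        le_rfl (by omega) (by omega)]
  | case6 fuel path c =>
    intro fA hfuel hfA
    rw [stepB, denoA, unwindA, loopA_nil]
    rfl
  | case7 fuel path c rem rest ih =>
    intro fA hfuel hfA
    rw [stepB, ih fA hfuel hfA, denoA, denoA]
    conv_rhs => rw [unwindA, loopA_nil]
  | case8 fuel path nxt rem stack c hc =>
    intro fA hfuel hfA
    rw [stepB, if_pos hc, denoA, unwindA]
    simp only [loopA_budget fA _ _ _ _ _ _ _ hc]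
    rw [unwindA_budget fA adj target length M stack path.dropLast c hc]
  | case9 fuel path nxt rem stack c hc hv ih =>
    intro fA hfuel hfA
    obtain ⟨h1, h2, h3⟩ := (viableB_iff path target length nxt).mp hv
    rw [stepB, if_neg hc, if_pos hv, ih fA hfuel hfA, denoA, denoA, unwindA, loopA.eq_def]
    simp only [if_neg hc, if_neg h1, if_neg h2, if_neg h3]
    rcases hres : btA fA adj (path ++ [nxt]) target length c M with ⟨r, c'⟩
    cases r with
    | some v => simp
    | none =>
      simp only [List.dropLast_concat]
      rw [unwindA]
  | case10 fuel path nxt rem stack c hc hv ih =>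
    intro fA hfuel hfA
    have hs : (nxt = target ∧ (path.length : Int) < length) ∨ nxt ∈ path ∨
        nxt < PySem.List.pyGetD path 0 0 := by
      by_cases h1 : nxt = target ∧ (path.length : Int) < length
      · exact Or.inl h1
      · by_cases h2 : nxt ∈ path
        · exact Or.inr (Or.inl h2)
        · by_cases h3 : nxt < PySem.List.pyGetD path 0 0
          · exact Or.inr (Or.inr h3)
          · exact absurd ((viableB_iff path target length nxt).mpr ⟨h1, h2, h3⟩) hv
    rw [stepB, if_neg hc, if_neg hv, ih fA hfuel hfA, denoA, denoA]
    conv_rhs => rw [unwindA, loopA_skip fA _ _ _ _ _ _ _ _ hc hs]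
    rw [unwindA]

-- ===== VERDICT (by name: the statement is the Claim_ definition above) =====
theorem cycle_bt_py_spec : Claim_equal_cycle_bt_py := by
  unfold Claim_equal_cycle_bt_py
  intro adj path target length counter max_iters _ _
  unfold Spec_cycle_bt_py
  cases counter with
  | nil => rfl
  | cons c0 crest =>
    simp only [cycle_bt_py, cycle_bt_py_alt]
    rw [simB adj target length max_iters (max_iters - c0).toNat path none [] c0
      (max_iters - c0).toNat le_rfl le_rfl, denoA]
    rcases hres : btA (max_iters - c0).toNat adj path target length c0 max_iters with ⟨r, c'⟩
    cases r with
    | some v => rfl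
    | none => simp [unwindA]
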